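-- pv_equiv track=rewrite | github.com/DarknessRdg/markdown-generator | indented_language.py | get_file_docstring
-- ===== SOURCE A (Python) =====
-- DOCSTRING = '"""'
--
-- def get_docstring_range(file, function_index, function=True):
--     if function:
--         while not file[function_index].strip().endswith(':'):
--             function_index += 1
--
--     index = function_index + 1
--
--     while not file[index].strip():
--         index += 1
--
--     line = file[index]
--
--     if not line.strip().startswith(DOCSTRING):
--         return range(function_index+1, function_index+1)
--
--     count = line.count(DOCSTRING)
--     start, end = index, index
--     while count == 1:
--         index += 1
--         line = file[index]
--         count += line.count(DOCSTRING)
--         end = index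
--
--     return range(start, end+1)
--
-- def get_file_docstring(file):
--     docs_range = get_docstring_range(file, -1, function=False)
--
--     docs = [
--         file[index].replace(DOCSTRING, '')
--         for index in docs_range
--     ]
--     if docs and not docs[0].strip():
--         docs.pop(0)
--     if docs and not docs[-1].strip():
--         docs.pop()
--
--     return '\n'.join(docs) + '\n', docs_range.stop
-- ===== SOURCE B (Python) =====
-- DOCSTRING = '"""'
--
-- def get_file_docstring(file):
--     # single fused scan: skip blanks, then collect docstring lines while counting quote triples
--     i = 0
--     while i < len(file) and not file[i].strip():
--         i += 1
--     if i == len(file) or not file[i].strip().startswith(DOCSTRING):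
--         return '\n', 0
--     docs = []
--     count = 0
--     while True:
--         line = file[i]
--         count += line.count(DOCSTRING)
--         docs.append(line.replace(DOCSTRING, ''))
--         end = i
--         if count != 1:
--             break
--         i += 1
--     if not docs[0].strip():
--         docs.pop(0)
--     if docs and not docs[-1].strip():
--         docs.pop()
--     return '\n'.join(docs) + '\n', end + 1
-- ===== Notes on version B (the rewrite author's own statement) =====
-- stated objective: simpler
-- what changed: A computes an index range via a helper (skip-blank scan, then a closing-quote scan) and then re-reads file[index] in a comprehension over that range; B inlines the helper and fuses both phases into one forward scan that builds the docstring lines directly while counting quote triples.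
import Mathlib
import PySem

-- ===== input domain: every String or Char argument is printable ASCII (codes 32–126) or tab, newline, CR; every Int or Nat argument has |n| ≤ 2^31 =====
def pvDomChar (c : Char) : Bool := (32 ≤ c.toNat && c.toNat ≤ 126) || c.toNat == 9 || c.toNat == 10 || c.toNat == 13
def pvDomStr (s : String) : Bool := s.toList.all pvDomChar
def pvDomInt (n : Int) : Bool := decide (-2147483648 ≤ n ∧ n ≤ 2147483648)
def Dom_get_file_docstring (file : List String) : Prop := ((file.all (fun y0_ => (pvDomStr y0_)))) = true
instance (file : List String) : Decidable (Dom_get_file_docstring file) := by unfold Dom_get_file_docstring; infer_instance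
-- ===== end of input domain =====

-- B fuses A's two phases (range computation + comprehension) into one scan that builds the
-- docstring lines directly; objective: simpler (no helper, no index range, one pass).

-- ===== PORT A =====
def pvDOC : String := "\"\"\""

-- 'while not file[function_index].strip().endswith(":"): function_index += 1' (fuel-bounded; pyGet? none = IndexError, outside Pre_)
def pvColonA (file : List String) : Nat → Int → Int
  | 0, i => i
  | n+1, i =>
    match PySem.List.pyGet? file i with
    | none => i
    | some line => if PySem.Str.endswith (PySem.Str.strip line) ":" then i else pvColonA file n (i+1)

-- 'while not file[index].strip(): index += 1'
def pvSkipA (file : List String) : Nat → Int → Int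
  | 0, i => i
  | n+1, i =>
    match PySem.List.pyGet? file i with
    | none => i
    | some line => if PySem.Str.strip line = "" then pvSkipA file n (i+1) else i

-- 'while count == 1: index += 1; line = file[index]; count += line.count(DOCSTRING); end = index'
def pvScanA (file : List String) : Nat → Int → Int → Int → Int
  | 0, _, _, e => e
  | n+1, i, c, e =>
    if c = 1 then
      match PySem.List.pyGet? file (i+1) with
      | none => e
      | some line => pvScanA file n (i+1) (c + (PySem.Str.count line pvDOC : Int)) (i+1)
    else e

-- returns range(a, b) as the pair (a, b)
def get_docstring_range (file : List String) (function_index : Int) (function : Bool) : Int × Int :=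
  let function_index := if function then pvColonA file (file.length + 1) function_index else function_index
  let index := pvSkipA file (file.length + 1) (function_index + 1)
  match PySem.List.pyGet? file index with
  | none => (function_index + 1, function_index + 1)  -- unreachable under Pre_ (IndexError)
  | some line =>
    if ¬ (PySem.Str.startswith (PySem.Str.strip line) pvDOC = true) then
      (function_index + 1, function_index + 1)
    else
      let count : Int := (PySem.Str.count line pvDOC : Int)
      let e := pvScanA file (file.length + 1) index count index
      (index, e + 1)

def get_file_docstring (file : List String) : String × Int :=
  let r := get_docstring_range file (-1) false
  let docs := (PySem.List.pyRange r.1 r.2 1).map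
      (fun idx => PySem.Str.replace (PySem.List.pyGetD file idx "") pvDOC "")
  let docs := if docs ≠ [] ∧ PySem.Str.strip (docs.headD "") = "" then docs.tail else docs
  let docs := if docs ≠ [] ∧ PySem.Str.strip (docs.getLastD "") = "" then docs.dropLast else docs
  (PySem.Str.join "\n" docs ++ "\n", r.2)

-- ===== PORT B =====
-- 'while i < len(file) and not file[i].strip(): i += 1'
def pvSkipB (file : List String) : Nat → Int → Int
  | 0, i => i
  | n+1, i =>
    if i < (file.length : Int) ∧ PySem.Str.strip (PySem.List.pyGetD file i "") = "" then
      pvSkipB file n (i+1)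
    else i

-- the fused 'while True' collect loop: returns (docs, end)
def pvLoopB (file : List String) : Nat → Int → Int → List String → List String × Int
  | 0, i, _, acc => (acc, i)
  | n+1, i, c, acc =>
    match PySem.List.pyGet? file i with
    | none => (acc, i)  -- IndexError, outside Pre_
    | some line =>
      let c := c + (PySem.Str.count line pvDOC : Int)
      let acc := acc ++ [PySem.Str.replace line pvDOC ""]
      if c ≠ 1 then (acc, i) else pvLoopB file n (i+1) c acc

def get_file_docstring_alt (file : List String) : String × Int :=
  let i := pvSkipB file (file.length + 1) 0
  if i = (file.length : Int) ∨
     ¬ (PySem.Str.startswith (PySem.Str.strip (PySem.List.pyGetD file i "")) pvDOC = true) then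
    ("\n", 0)
  else
    let p := pvLoopB file (file.length + 1) i 0 []
    let docs := if PySem.Str.strip (p.1.headD "") = "" then p.1.tail else p.1
    let docs := if docs ≠ [] ∧ PySem.Str.strip (docs.getLastD "") = "" then docs.dropLast else docs
    (PySem.Str.join "\n" docs ++ "\n", p.2 + 1)

-- ===== PRECONDITION & SPEC =====
-- Pre_ excludes exactly the inputs on which A raises IndexError: files with no non-blank line,
-- and files whose docstring opened by the first non-blank line is never closed.
def Pre_get_file_docstring (file : List String) : Prop :=
  ∃ i < file.length, (∀ k < i, PySem.Str.strip (file.getD k "") = "") ∧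
    PySem.Str.strip (file.getD i "") ≠ "" ∧
    (PySem.Str.startswith (PySem.Str.strip (file.getD i "")) "\"\"\"" = true →
      (PySem.Str.count (file.getD i "") "\"\"\"" ≠ 1 ∨
       ∃ j < file.length, i < j ∧ 1 ≤ PySem.Str.count (file.getD j "") "\"\"\""))
instance (file : List String) : Decidable (Pre_get_file_docstring file) := by
  unfold Pre_get_file_docstring; infer_instance

def pvWitness_get_file_docstring : List String := ["", "\"\"\"doc", "line", "\"\"\""]

def Spec_get_file_docstring (file : List String) (out : String × Int) : Prop := out = get_file_docstring_alt file
instance (file : List String) (out : String × Int) : Decidable (Spec_get_file_docstring file out) := by unfold Spec_get_file_docstring; infer_instance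

-- ===== CLAIM (what is proved, stated in full; the proofs are below) =====
def Claim_equal_get_file_docstring : Prop := ∀ (file : List String), Dom_get_file_docstring file → Pre_get_file_docstring file → Spec_get_file_docstring file (get_file_docstring file)

-- ===== LEMMAS AND PROOFS =====

-- both skip-blank loops stop at the first non-blank index t
theorem pvSkip_eq (file : List String) (t : Nat) (ht : t < file.length)
    (hblank : ∀ k < t, PySem.Str.strip (file.getD k "") = "")
    (hnb : PySem.Str.strip (file.getD t "") ≠ "") :
    ∀ (n : Nat) (i : Nat), i ≤ t → t - i < n →
      pvSkipA file n (i:Int) = (t:Int) ∧ pvSkipB file n (i:Int) = (t:Int) := by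
  intro n
  induction n with
  | zero => intro i _ h; omega
  | succ n ih =>
    intro i hle hf
    have hi : i < file.length := by omega
    have hg : PySem.List.pyGet? file (i:Int) = some (file.getD i "") := by
      rw [PySem.List.pyGet?_natCast]
      simp [List.getElem?_eq_getElem hi, List.getD_eq_getElem?_getD]
    by_cases he : i = t
    · subst he
      constructor
      · rw [pvSkipA, hg]
        dsimp only
        exact if_neg hnb
      · rw [pvSkipB, PySem.List.pyGetD_natCast]
        exact if_neg (fun h => hnb h.2)
    · have hlt : i < t := by omega
      have hb : PySem.Str.strip (file.getD i "") = "" := hblank i hlt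
      have hcast : (i:Int) + 1 = ((i+1 : Nat) : Int) := by push_cast; ring
      have hrec := ih (i+1) (by omega) (by omega)
      constructor
      · rw [pvSkipA, hg]; dsimp only; rw [if_pos hb, hcast]; exact hrec.1
      · rw [pvSkipB, PySem.List.pyGetD_natCast,
            if_pos ⟨by exact_mod_cast hi, hb⟩, hcast]
        exact hrec.2

-- the accumulator of pvLoopB just prepends
theorem pvLoopB_acc (file : List String) : ∀ (n : Nat) (i c : Int) (acc : List String),
    pvLoopB file n i c acc = (acc ++ (pvLoopB file n i c []).1, (pvLoopB file n i c []).2) := by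
  intro n
  induction n with
  | zero => intro i c acc; simp [pvLoopB]
  | succ n ih =>
    intro i c acc
    rw [pvLoopB, pvLoopB]
    cases h : PySem.List.pyGet? file i with
    | none => simp
    | some line =>
      dsimp only
      by_cases hc : c + (PySem.Str.count line pvDOC : Int) ≠ 1
      · rw [if_pos hc, if_pos hc]; simp
      · rw [if_neg hc, if_neg hc,
            ih (i+1) _ (acc ++ [PySem.Str.replace line pvDOC ""]),
            ih (i+1) _ ([] ++ [PySem.Str.replace line pvDOC ""])]
        simp

-- pvScanA never moves its end below the start
theorem pvScanA_ge (file : List String) : ∀ (n : Nat) (i c : Int), i ≤ pvScanA file n i c i := by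
  intro n
  induction n with
  | zero => intro i c; simp [pvScanA]
  | succ n ih =>
    intro i c
    rw [pvScanA]
    by_cases hc : c = 1
    · rw [if_pos hc]
      cases h : PySem.List.pyGet? file (i+1) with
      | none => exact le_refl i
      | some line =>
        dsimp only
        exact le_trans (by omega) (ih (i+1) _)
    · rw [if_neg hc]

-- the fused loop of B computes exactly A's (docs, end)
theorem pvLoop_rel (file : List String) : ∀ (n : Nat) (i : Nat) (c : Int),
    i < file.length →
    (c + (PySem.Str.count (file.getD i "") pvDOC : Int) = 1 →
        ∃ j < file.length, i < j ∧ 1 ≤ PySem.Str.count (file.getD j "") pvDOC) →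
    file.length - i < n →
    pvLoopB file n (i:Int) c [] =
      ((PySem.List.pyRange (i:Int)
          (pvScanA file n (i:Int) (c + (PySem.Str.count (file.getD i "") pvDOC : Int)) (i:Int) + 1) 1).map
        (fun idx => PySem.Str.replace (PySem.List.pyGetD file idx "") pvDOC ""),
       pvScanA file n (i:Int) (c + (PySem.Str.count (file.getD i "") pvDOC : Int)) (i:Int)) := by
  intro n
  induction n with
  | zero => intro i c hi _ hf; omega
  | succ n ih =>
    intro i c hi hterm hf
    have hg : PySem.List.pyGet? file (i:Int) = some (file.getD i "") := by
      rw [PySem.List.pyGet?_natCast]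
      simp [List.getElem?_eq_getElem hi, List.getD_eq_getElem?_getD]
    rw [pvLoopB, hg]
    dsimp only
    by_cases hc : c + (PySem.Str.count (file.getD i "") pvDOC : Int) = 1
    · -- continue: A scans line i+1, B recurses on i+1
      obtain ⟨j, hj, hij, hcj⟩ := hterm hc
      have hi1 : i + 1 < file.length := by omega
      have hcast : (i:Int) + 1 = ((i+1 : Nat) : Int) := by push_cast; ring
      have hg1 : PySem.List.pyGet? file ((i:Int)+1) = some (file.getD (i+1) "") := by
        rw [hcast, PySem.List.pyGet?_natCast]
        simp [List.getElem?_eq_getElem hi1, List.getD_eq_getElem?_getD]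
      have hterm2 : (c + (PySem.Str.count (file.getD i "") pvDOC : Int)) +
            (PySem.Str.count (file.getD (i+1) "") pvDOC : Int) = 1 →
          ∃ j' < file.length, i + 1 < j' ∧ 1 ≤ PySem.Str.count (file.getD j' "") pvDOC := by
        intro h1
        have hz : PySem.Str.count (file.getD (i+1) "") pvDOC = 0 := by omega
        refine ⟨j, hj, ?_, hcj⟩
        rcases Nat.lt_or_ge (i+1) j with h | h
        · exact h
        · exfalso
          have hji : j = i + 1 := by omega
          rw [hji] at hcj
          omega
      have hrec := ih (i+1) (c + (PySem.Str.count (file.getD i "") pvDOC : Int)) hi1 hterm2 (by omega)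
      have hA : pvScanA file (n+1) (i:Int) (c + (PySem.Str.count (file.getD i "") pvDOC : Int)) (i:Int) =
          pvScanA file n (((i+1):Nat):Int)
            ((c + (PySem.Str.count (file.getD i "") pvDOC : Int)) + (PySem.Str.count (file.getD (i+1) "") pvDOC : Int))
            (((i+1):Nat):Int) := by
        rw [pvScanA, if_pos hc, hg1]
        dsimp only
        rw [hcast]
      rw [if_neg (not_not_intro hc), pvLoopB_acc, hcast, hrec, hA]
      have hge : (((i+1):Nat):Int) ≤
          pvScanA file n (((i+1):Nat):Int)
            ((c + (PySem.Str.count (file.getD i "") pvDOC : Int)) + (PySem.Str.count (file.getD (i+1) "") pvDOC : Int))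
            (((i+1):Nat):Int) := pvScanA_ge file n _ _
      rw [Prod.mk.injEq]
      refine ⟨?_, rfl⟩
      -- docs: prepend line i
      conv_rhs => rw [PySem.List.pyRange_one_cons (by omega)]
      simp only [List.map_cons, List.nil_append, List.cons_append,
        PySem.List.pyGetD_natCast, hcast]
    · -- stop: both return at line i
      have hA : pvScanA file (n+1) (i:Int) (c + (PySem.Str.count (file.getD i "") pvDOC : Int)) (i:Int) = (i:Int) := by
        rw [pvScanA, if_neg hc]
      rw [if_pos hc, hA]
      rw [PySem.List.pyRange_one_singleton]
      simp only [List.map_cons, List.map_nil, List.nil_append, PySem.List.pyGetD_natCast]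

-- ===== VERDICT (by name: the statement is the Claim_ definition above) =====
set_option maxHeartbeats 1000000 in
theorem get_file_docstring_spec : Claim_equal_get_file_docstring := by
  intro file _ hpre
  obtain ⟨t, ht, hblank, hnb, hdoc⟩ := hpre
  rw [show ("\"\"\"" : String) = pvDOC from rfl] at hdoc
  unfold Spec_get_file_docstring
  have h0 : ((-1 : Int) + 1) = ((0:Nat):Int) := by norm_num
  have hskip := pvSkip_eq file t ht hblank hnb (file.length + 1) 0 (by omega) (by omega)
  have hg : PySem.List.pyGet? file (t:Int) = some (file.getD t "") := by
    rw [PySem.List.pyGet?_natCast]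
    simp [List.getElem?_eq_getElem ht, List.getD_eq_getElem?_getD]
  have htne : ¬ ((t:Int) = (file.length:Int)) := by
    intro h; omega
  have hskip2 : pvSkipB file (file.length + 1) 0 = (t:Int) := by
    rw [show (0:Int) = ((0:Nat):Int) by norm_num]; exact hskip.2
  by_cases hsw : PySem.Str.startswith (PySem.Str.strip (file.getD t "")) pvDOC = true
  · -- docstring present
    have hdoc' := hdoc hsw
    have hterm : (0:Int) + (PySem.Str.count (file.getD t "") pvDOC : Int) = 1 →
        ∃ j < file.length, t < j ∧ 1 ≤ PySem.Str.count (file.getD j "") pvDOC := by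
      intro h1
      rcases hdoc' with h | h
      · exfalso; apply h; omega
      · exact h
    have hrel := pvLoop_rel file (file.length + 1) t 0 ht hterm (by omega)
    have hz : (0:Int) + (PySem.Str.count (file.getD t "") pvDOC : Int) =
        (PySem.Str.count (file.getD t "") pvDOC : Int) := by ring
    rw [hz] at hrel
    set E := pvScanA file (file.length + 1) (t:Int)
        ((PySem.Str.count (file.getD t "") pvDOC : Int)) (t:Int) with hE
    set D := (PySem.List.pyRange (t:Int) (E + 1) 1).map
        (fun idx => PySem.Str.replace (PySem.List.pyGetD file idx "") pvDOC "") with hD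
    have hge : (t:Int) ≤ E := pvScanA_ge file _ _ _
    have hne : D ≠ [] := by
      rw [hD, PySem.List.pyRange_one_cons (by omega)]
      simp
    have hr : get_docstring_range file (-1) false = ((t:Int), E + 1) := by
      unfold get_docstring_range
      dsimp only
      simp only [Bool.false_eq_true, if_false]
      rw [h0, hskip.1, hg]
      dsimp only
      rw [if_neg (not_not_intro hsw), ← hE]
    clear_value E D
    unfold get_file_docstring get_file_docstring_alt
    dsimp only
    rw [hr, hskip2]
    dsimp only
    have hBneg : ¬ (((t:Int) = (file.length:Int)) ∨
        ¬ (PySem.Str.startswith (PySem.Str.strip (PySem.List.pyGetD file (t:Int) "")) pvDOC = true)) := by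
      rw [PySem.List.pyGetD_natCast]
      exact fun h => h.elim htne (fun h2 => h2 hsw)
    rw [if_neg hBneg]

    rw [hrel]
    dsimp only
    rw [← hD]
    have htrim : (if D ≠ [] ∧ PySem.Str.strip (D.headD "") = "" then D.tail else D) =
        (if PySem.Str.strip (D.headD "") = "" then D.tail else D) := by
      by_cases hh : PySem.Str.strip (D.headD "") = ""
      · rw [if_pos (And.intro hne hh), if_pos hh]
      · rw [if_neg (fun h => hh h.2), if_neg hh]
    rw [htrim]
  · -- no docstring: A builds the empty range, B returns directly
    have hr : get_docstring_range file (-1) false = (0, 0) := by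
      unfold get_docstring_range
      dsimp only
      simp only [Bool.false_eq_true, if_false]
      rw [h0, hskip.1, hg]
      dsimp only
      rw [if_pos hsw]
      norm_num
    unfold get_file_docstring get_file_docstring_alt
    dsimp only
    rw [hr, hskip2]
    dsimp only
    have hBpos : ((t:Int) = (file.length:Int)) ∨
        ¬ (PySem.Str.startswith (PySem.Str.strip (PySem.List.pyGetD file (t:Int) "")) pvDOC = true) := by
      rw [PySem.List.pyGetD_natCast]
      exact Or.inr hsw
    rw [if_pos hBpos]
    rw [PySem.List.pyRange_one_eq_nil (le_refl 0)]
    simp only [List.map_nil, ne_eq, not_true_eq_false, false_and, if_false]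
    decide
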